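-- pv_equiv track=rewrite | github.com/sling1678/python | hacker_rank/src/day1_prob_irq_numpy.py | get_lower_and_upper_halves
-- ===== SOURCE A (Python) =====
-- def find_median (x):
--     idx_mid = len(x)//2
--     y = sorted(x)
--     if len(x)%2 == 0:
--         median = (y[idx_mid] + y[idx_mid - 1])/2
--     else:
--         median = y[idx_mid]
--     return median
--
-- def get_lower_and_upper_halves(x):
--     y = sorted(x)
--     m = find_median(y)
--     L =[]
--     U=[]
--     for num in y:
--         if num < m:
--             L.append(num)
--         elif num > m:
--             U.append(num)
--     return L,U
-- ===== SOURCE B (Python) =====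
-- def _first_false(y, pred):
--     # binary search: first index whose element fails pred (pred is True on a prefix of sorted y)
--     lo, hi = 0, len(y)
--     while lo < hi:
--         mid = (lo + hi) // 2
--         if pred(y[mid]):
--             lo = mid + 1
--         else:
--             hi = mid
--     return lo
--
-- def get_lower_and_upper_halves(x):
--     y = sorted(x)
--     n = len(y)
--     h = n // 2
--     if n % 2 == 0:
--         s = y[h] + y[h - 1]      # twice the median (avoids float; comparisons below are exact)
--     else:
--         s = 2 * y[h]
--     i = _first_false(y, lambda v: 2 * v < s)
--     j = _first_false(y, lambda v: 2 * v <= s)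
--     return y[:i], y[j:]
-- ===== Notes on version B (the rewrite author's own statement) =====
-- stated objective: alternative
-- what changed: Instead of scanning the sorted list and appending each element by comparing with the median, B locates the two cut points with hand-rolled binary searches (bisect_left/bisect_right equivalents on twice-the-values, avoiding floats) and returns the two slices.
import Mathlib
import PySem

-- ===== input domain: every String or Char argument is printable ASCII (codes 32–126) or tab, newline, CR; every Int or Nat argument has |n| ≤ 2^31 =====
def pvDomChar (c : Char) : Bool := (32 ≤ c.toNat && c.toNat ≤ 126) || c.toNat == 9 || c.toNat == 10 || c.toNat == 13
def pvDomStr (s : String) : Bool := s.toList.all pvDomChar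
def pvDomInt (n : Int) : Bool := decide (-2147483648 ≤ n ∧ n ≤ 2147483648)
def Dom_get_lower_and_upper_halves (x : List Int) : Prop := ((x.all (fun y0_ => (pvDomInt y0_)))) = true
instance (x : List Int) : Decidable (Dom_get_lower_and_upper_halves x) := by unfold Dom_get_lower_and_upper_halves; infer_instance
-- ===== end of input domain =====

-- B replaces A's linear comparison scan by two binary searches for the cut points and returns slices;
-- same cost class (the sort dominates), structurally different partition step.
-- Medians are represented doubled (Int) throughout: for |values| ≤ 2^31 Python's float median
-- (a+b)/2 is exact and each comparison num < m is equivalent to 2*num < a+b, so the ports are exact.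

-- ===== PORT A =====
-- port of find_median, returning TWICE the median (exact, see note above)
def find_median2 (x : List Int) : Int :=
  let idx_mid := x.length / 2
  let y := PySem.List.sorted x (fun v => v) false
  if x.length % 2 == 0 then y.getD idx_mid 0 + y.getD (idx_mid - 1) 0
  else 2 * y.getD idx_mid 0

def get_lower_and_upper_halves (x : List Int) : List Int × List Int :=
  let y := PySem.List.sorted x (fun v => v) false
  let s := find_median2 y
  y.foldl (fun (acc : List Int × List Int) num =>
      if 2 * num < s then (acc.1 ++ [num], acc.2)
      else if 2 * num > s then (acc.1, acc.2 ++ [num])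
      else acc) ([], [])

-- ===== PORT B =====
-- port of _first_false: fuel-bounded while-loop (fuel = hi - lo at the call suffices)
def firstFalse (y : List Int) (p : Int → Bool) : Nat → Nat → Nat → Nat
  | 0, lo, _ => lo
  | fuel + 1, lo, hi =>
    if lo < hi then
      let mid := (lo + hi) / 2
      if p (y.getD mid 0) then firstFalse y p fuel (mid + 1) hi
      else firstFalse y p fuel lo mid
    else lo

def get_lower_and_upper_halves_alt (x : List Int) : List Int × List Int :=
  let y := PySem.List.sorted x (fun v => v) false
  let n := y.length
  let h := n / 2
  let s := if n % 2 == 0 then y.getD h 0 + y.getD (h - 1) 0 else 2 * y.getD h 0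
  let i := firstFalse y (fun v => 2 * v < s) n 0 n
  let j := firstFalse y (fun v => 2 * v ≤ s) n 0 n
  (y.take i, y.drop j)

-- ===== PRECONDITION & SPEC =====
-- Pre_ excludes only the empty list, on which both Pythons raise IndexError (median of no data).
def Pre_get_lower_and_upper_halves (x : List Int) : Prop := x ≠ []
instance (x : List Int) : Decidable (Pre_get_lower_and_upper_halves x) := by
  unfold Pre_get_lower_and_upper_halves; infer_instance
def pvWitness_get_lower_and_upper_halves : List Int := [3, 1, 2]

def Spec_get_lower_and_upper_halves (x : List Int) (out : List Int × List Int) : Prop := out = get_lower_and_upper_halves_alt x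
instance (x : List Int) (out : List Int × List Int) : Decidable (Spec_get_lower_and_upper_halves x out) := by unfold Spec_get_lower_and_upper_halves; infer_instance

-- ===== CLAIM (what is proved, stated in full; the proofs are below) =====
def Claim_equal_get_lower_and_upper_halves : Prop := ∀ (x : List Int), Dom_get_lower_and_upper_halves x → Pre_get_lower_and_upper_halves x → Spec_get_lower_and_upper_halves x (get_lower_and_upper_halves x)

-- ===== LEMMAS AND PROOFS =====

-- A's loop with two accumulators is the pair of filters
theorem foldl_partition (s : Int) (y : List Int) (L U : List Int) :
    y.foldl (fun (acc : List Int × List Int) num =>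
      if 2 * num < s then (acc.1 ++ [num], acc.2)
      else if 2 * num > s then (acc.1, acc.2 ++ [num])
      else acc) (L, U)
    = (L ++ y.filter (fun v => decide (2 * v < s)),
       U ++ y.filter (fun v => decide (s < 2 * v))) := by
  induction y generalizing L U with
  | nil => simp
  | cons a t ih =>
    simp only [List.foldl_cons, List.filter_cons]
    rcases lt_trichotomy (2 * a) s with h | h | h
    · rw [if_pos h]
      simp only [ih, decide_eq_true h, decide_eq_false (by omega : ¬ s < 2 * a)]
      simp
    · rw [if_neg (by omega), if_neg (by omega)]
      simp only [decide_eq_false (by omega : ¬ 2 * a < s), decide_eq_false (by omega : ¬ s < 2 * a)]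
      exact ih L U
    · rw [if_neg (by omega), if_pos (by omega)]
      simp only [ih, decide_eq_true h, decide_eq_false (by omega : ¬ 2 * a < s)]
      simp

-- invariant of the binary-search loop: pred holds strictly below the result, fails from it on
theorem firstFalse_spec (y : List Int) (p : Int → Bool)
    (hdc : ∀ i k, (hi : i < y.length) → (hk : k < y.length) → k ≤ i → p y[i] = true → p y[k] = true) :
    ∀ fuel lo hi, lo ≤ hi → hi ≤ y.length → hi - lo ≤ fuel →
      (∀ k, (hk : k < y.length) → k < lo → p y[k] = true) →
      (∀ k, (hk : k < y.length) → hi ≤ k → p y[k] = false) →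
      (firstFalse y p fuel lo hi ≤ y.length ∧
        (∀ k, (hk : k < y.length) → k < firstFalse y p fuel lo hi → p y[k] = true) ∧
        (∀ k, (hk : k < y.length) → firstFalse y p fuel lo hi ≤ k → p y[k] = false)) := by
  intro fuel
  induction fuel with
  | zero =>
    intro lo hi hlh hhn hfuel hlow hhigh
    have : lo = hi := by omega
    subst this
    refine ⟨by simpa [firstFalse] using hlh.trans hhn, ?_, ?_⟩
    · simpa [firstFalse] using hlow
    · simpa [firstFalse] using hhigh
  | succ fuel ih =>
    intro lo hi hlh hhn hfuel hlow hhigh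
    by_cases hlt : lo < hi
    · have hmid : (lo + hi) / 2 < y.length := by omega
      have hgd : y[(lo + hi) / 2]? = some y[(lo + hi) / 2] := List.getElem?_eq_getElem hmid
      by_cases hp : p y[(lo + hi) / 2] = true
      · have : firstFalse y p (fuel + 1) lo hi = firstFalse y p fuel ((lo + hi) / 2 + 1) hi := by
          simp [firstFalse, hlt, hgd, hp]
        rw [this]
        exact ih ((lo + hi) / 2 + 1) hi (by omega) hhn (by omega)
          (fun k hk hklt => hdc _ k hmid hk (by omega) hp) hhigh
      · have : firstFalse y p (fuel + 1) lo hi = firstFalse y p fuel lo ((lo + hi) / 2) := by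
          simp [firstFalse, hlt, hgd, hp]
        rw [this]
        refine ih lo ((lo + hi) / 2) (by omega) (by omega) (by omega) hlow ?_
        intro k hk hmk
        by_contra hc
        exact hp (hdc k _ hk hmid hmk (by simpa using hc))
    · have : firstFalse y p (fuel + 1) lo hi = lo := by simp [firstFalse, hlt]
      rw [this]
      have : lo = hi := by omega
      subst this
      exact ⟨hhn, hlow, hhigh⟩

-- a prefix cut at the first-false index is the filter
theorem take_eq_filter (p : Int → Bool) :
    ∀ (y : List Int) (r : Nat), r ≤ y.length →
      (∀ k, (hk : k < y.length) → k < r → p y[k] = true) →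
      (∀ k, (hk : k < y.length) → r ≤ k → p y[k] = false) →
      y.take r = y.filter p := by
  intro y
  induction y with
  | nil => intro r _ _ _; simp
  | cons a t ih =>
    intro r hr hlow hhigh
    cases r with
    | zero =>
      have ha : p a = false := hhigh 0 (by simp) (by omega)
      have : t.filter p = [] := by
        rw [List.filter_eq_nil_iff]
        intro b hb
        obtain ⟨k, hk, rfl⟩ := List.mem_iff_getElem.mp hb
        have := hhigh (k + 1) (by simpa using Nat.succ_lt_succ hk) (by omega)
        simpa using this
      simp [ha, this]
    | succ r' =>
      have ha : p a = true := hlow 0 (by simp) (by omega)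
      have ht : t.take r' = t.filter p := by
        refine ih r' (by simpa using hr) ?_ ?_
        · intro k hk hkr
          have := hlow (k + 1) (by simpa using Nat.succ_lt_succ hk) (by omega)
          simpa using this
        · intro k hk hrk
          have := hhigh (k + 1) (by simpa using Nat.succ_lt_succ hk) (by omega)
          simpa using this
      simp [List.take_succ_cons, ha, ht]

-- a suffix cut at the first-false index is the filter of the negation
theorem drop_eq_filter_not (q : Int → Bool) :
    ∀ (y : List Int) (r : Nat), r ≤ y.length →
      (∀ k, (hk : k < y.length) → k < r → q y[k] = true) →
      (∀ k, (hk : k < y.length) → r ≤ k → q y[k] = false) →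
      y.drop r = y.filter (fun v => ! q v) := by
  intro y
  induction y with
  | nil => intro r _ _ _; simp
  | cons a t ih =>
    intro r hr hlow hhigh
    cases r with
    | zero =>
      have : (a :: t).filter (fun v => ! q v) = a :: t := by
        rw [List.filter_eq_self]
        intro b hb
        obtain ⟨k, hk, rfl⟩ := List.mem_iff_getElem.mp hb
        simp [hhigh k hk (by omega)]
      simp [this]
    | succ r' =>
      have ha : q a = true := hlow 0 (by simp) (by omega)
      have ht : t.drop r' = t.filter (fun v => ! q v) := by
        refine ih r' (by simpa using hr) ?_ ?_
        · intro k hk hkr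
          have := hlow (k + 1) (by simpa using Nat.succ_lt_succ hk) (by omega)
          simpa using this
        · intro k hk hrk
          have := hhigh (k + 1) (by simpa using Nat.succ_lt_succ hk) (by omega)
          simpa using this
      simp [List.drop_succ_cons, ha, ht]

-- ===== VERDICT (by name: the statement is the Claim_ definition above) =====
theorem get_lower_and_upper_halves_spec : Claim_equal_get_lower_and_upper_halves := by
  intro x _ _
  unfold Spec_get_lower_and_upper_halves get_lower_and_upper_halves get_lower_and_upper_halves_alt
  dsimp only
  set y := PySem.List.sorted x (fun v => v) false with hy
  have hpw : y.Pairwise (fun a b => a ≤ b) := PySem.List.sorted_pairwise x (fun v => v)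
  have hsy : PySem.List.sorted y (fun v => v) false = y := PySem.List.sorted_sorted x (fun v => v)
  have hs : find_median2 y =
      (if y.length % 2 == 0 then y.getD (y.length / 2) 0 + y.getD (y.length / 2 - 1) 0
       else 2 * y.getD (y.length / 2) 0) := by
    simp [find_median2, hsy]
  set s := (if y.length % 2 == 0 then y.getD (y.length / 2) 0 + y.getD (y.length / 2 - 1) 0
       else 2 * y.getD (y.length / 2) 0) with hsdef
  have hidx : ∀ i k, (hi : i < y.length) → (hk : k < y.length) → k ≤ i → y[k] ≤ y[i] := by
    intro i k hi hk hki
    rcases Nat.lt_or_ge k i with h | h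
    · exact List.pairwise_iff_getElem.mp hpw k i hk hi h
    · have : k = i := by omega
      subst this; exact le_refl _
  have hdcp : ∀ i k, (hi : i < y.length) → (hk : k < y.length) → k ≤ i →
      (fun v => decide (2 * v < s)) y[i] = true → (fun v => decide (2 * v < s)) y[k] = true := by
    intro i k hi hk hki h
    have := hidx i k hi hk hki
    simp at h ⊢; omega
  have hdcq : ∀ i k, (hi : i < y.length) → (hk : k < y.length) → k ≤ i →
      (fun v => decide (2 * v ≤ s)) y[i] = true → (fun v => decide (2 * v ≤ s)) y[k] = true := by
    intro i k hi hk hki h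
    have := hidx i k hi hk hki
    simp at h ⊢; omega
  have hpspec := firstFalse_spec y (fun v => decide (2 * v < s)) hdcp y.length 0 y.length
    (by omega) (le_refl _) (by omega) (by omega) (by omega)
  have hqspec := firstFalse_spec y (fun v => decide (2 * v ≤ s)) hdcq y.length 0 y.length
    (by omega) (le_refl _) (by omega) (by omega) (by omega)
  have htake := take_eq_filter (fun v => decide (2 * v < s)) y _ hpspec.1 hpspec.2.1 hpspec.2.2
  have hdrop := drop_eq_filter_not (fun v => decide (2 * v ≤ s)) y _ hqspec.1 hqspec.2.1 hqspec.2.2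
  have hneg : y.filter (fun v => ! decide (2 * v ≤ s)) = y.filter (fun v => decide (s < 2 * v)) := by
    apply List.filter_congr
    intro a _
    rcases lt_or_ge s (2 * a) with h | h
    · simp [h, (by omega : ¬ 2 * a ≤ s)]
    · simp [(by omega : 2 * a ≤ s), (by omega : ¬ s < 2 * a)]
  rw [hs, foldl_partition s y [] []]
  simp only [List.nil_append]
  rw [htake, hdrop, hneg]
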